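-- pv_equiv track=rewrite | github.com/tensorflow/autograph | reference_tests/nested_control_flow_test.py | while_continue_in_try
-- ===== SOURCE A (Python) =====
-- def while_continue_in_try(x):
--   z = 0
--   while x > 0:
--     x = x - 1
--     try:
--       if x < 5:
--         continue
--       z = z + 1
--     finally:
--       z = z + 10
--   return z
-- ===== SOURCE B (Python) =====
-- def while_continue_in_try(x):
--   # closed form: each iteration adds 10 (finally); iterations with x-1 >= 5 add 1 more
--   if x <= 0:
--     return 0
--   return 10 * x + max(0, x - 5)
-- ===== Notes on version B (the rewrite author's own statement) =====
-- stated objective: faster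
-- what changed: Replaced the countdown while-loop (with continue/finally bookkeeping) by the closed form 10*x + max(0, x-5) for x > 0, else 0.
import Mathlib
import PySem

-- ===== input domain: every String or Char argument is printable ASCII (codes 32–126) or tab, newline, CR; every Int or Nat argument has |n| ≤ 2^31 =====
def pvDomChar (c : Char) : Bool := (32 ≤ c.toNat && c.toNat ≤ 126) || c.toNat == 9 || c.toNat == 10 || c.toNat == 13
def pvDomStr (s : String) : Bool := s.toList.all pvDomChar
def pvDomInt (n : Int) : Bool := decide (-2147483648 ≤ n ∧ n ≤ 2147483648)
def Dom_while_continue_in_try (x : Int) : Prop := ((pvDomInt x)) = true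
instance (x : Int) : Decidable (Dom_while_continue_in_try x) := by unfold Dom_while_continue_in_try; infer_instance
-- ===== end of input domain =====

-- B replaces A's countdown loop by the closed form 10*x + max 0 (x-5): faster (O(1) vs O(x)).

-- ===== PORT A =====
-- loop body: x := x-1; if x < 5 the 'continue' skips z+1 but 'finally' still adds 10;
-- otherwise z gains 1 then 10.
def pvLoopA (x z : Int) : Int :=
  if x > 0 then
    let x' := x - 1
    if x' < 5 then pvLoopA x' (z + 10)
    else pvLoopA x' (z + 1 + 10)
  else z
termination_by x.toNat
decreasing_by all_goals omega

def while_continue_in_try (x : Int) : Int := pvLoopA x 0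

-- ===== PORT B =====
def while_continue_in_try_alt (x : Int) : Int :=
  if x ≤ 0 then 0 else 10 * x + max 0 (x - 5)

-- ===== PRECONDITION & SPEC =====
def Spec_while_continue_in_try (x : Int) (out : Int) : Prop := out = while_continue_in_try_alt x
instance (x : Int) (out : Int) : Decidable (Spec_while_continue_in_try x out) := by unfold Spec_while_continue_in_try; infer_instance

-- ===== CLAIM (what is proved, stated in full; the proofs are below) =====
def Claim_equal_while_continue_in_try : Prop := ∀ (x : Int), Dom_while_continue_in_try x → Spec_while_continue_in_try x (while_continue_in_try x)

-- ===== LEMMAS AND PROOFS =====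
theorem pvLoopA_closed : ∀ (n : Nat) (x z : Int), x.toNat = n →
    pvLoopA x z = z + (if x ≤ 0 then 0 else 10 * x + max 0 (x - 5)) := by
  intro n
  induction n with
  | zero =>
    intro x z h
    rw [pvLoopA]
    have : ¬ x > 0 := by omega
    simp [this]
  | succ k ih =>
    intro x z h
    rw [pvLoopA]
    have hx : x > 0 := by omega
    have h' : (x - 1).toNat = k := by omega
    by_cases h5 : x - 1 < 5
    · simp [hx, h5, ih (x - 1) (z + 10) h']
      omega
    · simp [hx, h5, ih (x - 1) (z + 1 + 10) h']
      omega

-- ===== VERDICT (by name: the statement is the Claim_ definition above) =====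
theorem while_continue_in_try_spec : Claim_equal_while_continue_in_try := by
  intro x _
  unfold Spec_while_continue_in_try while_continue_in_try while_continue_in_try_alt
  rw [pvLoopA_closed x.toNat x 0 rfl]
  omega
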